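-- pv_equiv track=rewrite | github.com/huangbinapple/DPCloser | find_path_dp.py | get_measure_len
-- ===== SOURCE A (Python) =====
-- def get_measure_len(action_strs, intervals):
--     result = []
--     action_strs = [ele for ele in action_strs if 'MM' not in ele]
--     reserved_len = 0
--     for action_str, interval in zip(action_strs, intervals):
--         if 'M' in action_str:
--             result.append(interval + reserved_len)
--             reserved_len = 0
--         else:
--             reserved_len += interval
--     return result
-- ===== SOURCE B (Python) =====
-- def get_measure_len(action_strs, intervals):
--     acts = [a for a in action_strs if 'MM' not in a]
--     pairs = list(zip(acts, intervals))
--     marks = [i for i, (a, _) in enumerate(pairs) if 'M' in a]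
--     out = []
--     start = 0
--     for i in marks:
--         out.append(sum(v for _, v in pairs[start:i + 1]))
--         start = i + 1
--     return out
-- ===== Notes on version B (the rewrite author's own statement) =====
-- stated objective: alternative
-- what changed: Replaces A's single pass with a running reserved_len accumulator by an explicit decomposition: build the zipped (action, interval) pair list, collect the indices of 'M'-marked entries, and emit one slice-sum per segment between consecutive marks.
import Mathlib
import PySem

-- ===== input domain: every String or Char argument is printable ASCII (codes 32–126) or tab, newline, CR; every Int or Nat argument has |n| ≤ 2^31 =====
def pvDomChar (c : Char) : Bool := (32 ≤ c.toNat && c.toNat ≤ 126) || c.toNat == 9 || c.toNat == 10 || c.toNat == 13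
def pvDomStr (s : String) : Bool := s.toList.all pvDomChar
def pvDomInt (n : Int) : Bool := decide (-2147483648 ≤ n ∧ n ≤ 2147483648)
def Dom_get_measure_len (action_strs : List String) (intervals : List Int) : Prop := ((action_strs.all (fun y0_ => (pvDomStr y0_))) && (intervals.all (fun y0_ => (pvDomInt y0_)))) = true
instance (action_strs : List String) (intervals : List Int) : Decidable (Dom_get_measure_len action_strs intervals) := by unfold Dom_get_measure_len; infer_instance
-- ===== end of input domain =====

-- B replaces A's running reserved_len accumulator by an explicit list of 'M'-mark indices
-- plus one slice-sum per segment (alternative decomposition, same cost).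

-- ===== PORT A =====
def pvLoopA (acc : List Int × Int) (p : String × Int) : List Int × Int :=
  if PySem.Str.isIn "M" p.1 then (acc.1 ++ [p.2 + acc.2], 0) else (acc.1, acc.2 + p.2)

def get_measure_len (action_strs : List String) (intervals : List Int) : List Int :=
  let acts := action_strs.filter (fun e => !(PySem.Str.isIn "MM" e))
  ((acts.zip intervals).foldl pvLoopA ([], 0)).1

-- ===== PORT B =====
-- sum(v for _, v in pairs[a:b])
def pvSegSum (pairs : List (String × Int)) (a b : Int) : Int :=
  ((PySem.List.slice pairs (some a) (some b)).map Prod.snd).sum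

def pvLoopB (pairs : List (String × Int)) (st : List Int × Int) (i : Int) : List Int × Int :=
  (st.1 ++ [pvSegSum pairs st.2 (i + 1)], i + 1)

def get_measure_len_alt (action_strs : List String) (intervals : List Int) : List Int :=
  let acts := action_strs.filter (fun a => !(PySem.Str.isIn "MM" a))
  let pairs := acts.zip intervals
  let marks := (PySem.List.enumerate pairs 0).filterMap
      (fun p => if PySem.Str.isIn "M" p.2.1 then some p.1 else none)
  (marks.foldl (pvLoopB pairs) ([], 0)).1

-- ===== PRECONDITION & SPEC =====
def Spec_get_measure_len (action_strs : List String) (intervals : List Int) (out : List Int) : Prop := out = get_measure_len_alt action_strs intervals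
instance (action_strs : List String) (intervals : List Int) (out : List Int) : Decidable (Spec_get_measure_len action_strs intervals out) := by unfold Spec_get_measure_len; infer_instance

-- ===== CLAIM (what is proved, stated in full; the proofs are below) =====
def Claim_equal_get_measure_len : Prop := ∀ (action_strs : List String) (intervals : List Int), Dom_get_measure_len action_strs intervals → Spec_get_measure_len action_strs intervals (get_measure_len action_strs intervals)

-- ===== LEMMAS AND PROOFS =====

-- common specification: result of processing the pair list with reserved accumulator r
def pvSpecG : List (String × Int) → Int → List Int
  | [], _ => []
  | (a, v) :: t, r => if PySem.Str.isIn "M" a then (v + r) :: pvSpecG t 0 else pvSpecG t (r + v)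

theorem pvLoopA_spec (ps : List (String × Int)) (res : List Int) (r : Int) :
    (ps.foldl pvLoopA (res, r)).1 = res ++ pvSpecG ps r := by
  induction ps generalizing res r with
  | nil => simp [pvSpecG]
  | cons p t ih =>
    obtain ⟨a, v⟩ := p
    by_cases h : PySem.Str.isIn "M" a <;> simp [PySem.Str.isIn] at h <;>
      simp [pvLoopA, pvSpecG, PySem.Str.isIn, h, ih]

theorem pvSegSum_empty (pairs : List (String × Int)) (s : Nat) :
    pvSegSum pairs (s : Int) (s : Int) = 0 := by
  simp [pvSegSum, PySem.List.slice_natCast]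

theorem pvSegSum_snoc (pairs : List (String × Int)) (s0 s : Nat) (a : String) (v : Int)
    (t : List (String × Int)) (hd : pairs.drop s = (a, v) :: t) (hle : s0 ≤ s) :
    pvSegSum pairs (s0 : Int) ((s : Int) + 1) = pvSegSum pairs (s0 : Int) (s : Int) + v := by
  have hget : pairs[s]? = some (a, v) := by
    have h0 : (pairs.drop s)[0]? = some (a, v) := by rw [hd]; rfl
    simpa [List.getElem?_drop] using h0
  have hcast : ((s : Int) + 1) = ((s + 1 : Nat) : Int) := by push_cast; ring
  rw [hcast]
  simp only [pvSegSum, PySem.List.slice_natCast]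
  have hstep : (s + 1 - s0) = (s - s0) + 1 := by omega
  rw [hstep, List.take_add_one]
  have : (pairs.drop s0)[s - s0]? = some (a, v) := by
    rw [List.getElem?_drop]
    have : s0 + (s - s0) = s := by omega
    rw [this, hget]
  simp [this]

theorem pvLoopB_spec (pairs : List (String × Int)) (t : List (String × Int)) (s s0 : Nat)
    (res : List Int) (hd : pairs.drop s = t) (hle : s0 ≤ s) :
    (((PySem.List.enumerate t (s : Int)).filterMap
        (fun p => if PySem.Str.isIn "M" p.2.1 then some p.1 else none)).foldl
      (pvLoopB pairs) (res, (s0 : Int))).1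
    = res ++ pvSpecG t (pvSegSum pairs (s0 : Int) (s : Int)) := by
  induction t generalizing s s0 res with
  | nil => simp [PySem.List.enumerate_nil, pvSpecG]
  | cons p t ih =>
    obtain ⟨a, v⟩ := p
    rw [PySem.List.enumerate_cons]
    simp only [List.filterMap_cons, pvSpecG]
    have hd' : pairs.drop (s + 1) = t := by
      have h1 := congrArg (List.drop 1) hd
      simpa [List.drop_drop, Nat.add_comm] using h1
    have hcast : ((s : Int) + 1) = ((s + 1 : Nat) : Int) := by push_cast; ring
    by_cases h : PySem.Str.isIn "M" a
    · rw [if_pos h]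
      simp [PySem.Str.isIn] at h
      simp only [List.foldl_cons, pvLoopB, hcast]
      rw [ih (s + 1) (s + 1) _ hd' (le_refl _)]
      rw [pvSegSum_empty]
      rw [← hcast, pvSegSum_snoc pairs s0 s a v t hd hle]
      simp [PySem.Str.isIn, h, Int.add_comm]
    · rw [if_neg h]
      simp [PySem.Str.isIn] at h
      have h2 := ih (s + 1) s0 res hd' (by omega)
      rw [← hcast] at h2
      rw [h2, pvSegSum_snoc pairs s0 s a v t hd hle]
      simp [PySem.Str.isIn, h, Int.add_comm]

-- ===== VERDICT (by name: the statement is the Claim_ definition above) =====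
theorem get_measure_len_spec : Claim_equal_get_measure_len := by
  intro action_strs intervals _
  unfold Spec_get_measure_len get_measure_len get_measure_len_alt
  set pairs := (action_strs.filter (fun e => !(PySem.Str.isIn "MM" e))).zip intervals with hp
  rw [pvLoopA_spec pairs [] 0]
  have := pvLoopB_spec pairs pairs 0 0 [] (by simp) (le_refl _)
  simp only [Nat.cast_zero] at this
  have h0 : pvSegSum pairs 0 0 = 0 := by simpa using pvSegSum_empty pairs 0
  rw [this, h0]
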